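-- pv_equiv track=rewrite | github.com/sulaymanbowles-hash/cioevhwr | scripts/generate_all_nuts.py | get_nut_type
-- ===== SOURCE A (Python) =====
-- def get_nut_type(part_number: str) -> str:
--     """Determine nut type from part number."""
--     pn_upper = part_number.upper()
--
--     # Castle Nuts
--     if any(x in pn_upper for x in ['AN310', 'MS20365', 'NAS1291']):
--         return 'castle'
--
--     # Self-Locking Nuts (Nylon Insert)
--     if any(x in pn_upper for x in ['MS21042', 'MS21043', 'MS21044', 'MS21045', 'NAS1021',
--                                      'BACN10', 'AN365']):
--         return 'locknut'
--
--     # Wing Nuts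
--     if 'AN315' in pn_upper or 'AN316' in pn_upper:
--         return 'wing'
--
--     # Slotted Nuts
--     if any(x in pn_upper for x in ['AN320', 'MS20364']):
--         return 'slotted'
--
--     # Flange Nuts
--     if any(x in pn_upper for x in ['MS21047', 'MS21048', 'MS21049', 'NAS1473']):
--         return 'flange'
--
--     # Square Nuts
--     if 'AN361' in pn_upper or 'MS51952' in pn_upper:
--         return 'square'
--
--     # Bearing/Jam Nuts
--     if any(x in pn_upper for x in ['AN316', 'MS21050', 'NAS1778']):
--         return 'jam'
--
--     # Coupling Nuts
--     if 'MS51866' in pn_upper: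
--         return 'coupling'
--
--     # Acorn/Cap Nuts
--     if 'AN460' in pn_upper or 'MS51972' in pn_upper:
--         return 'acorn'
--
--     # Default to hex nut
--     return 'hex'
-- ===== SOURCE B (Python) =====
-- # Priority index: pattern -> rank of its nut type (smaller = higher precedence).
-- # AN316 appears only once, at the 'wing' rank, because 'wing' outranks 'jam'.
-- _PRIORITY = {
--     'AN310': 0, 'MS20365': 0, 'NAS1291': 0,
--     'MS21042': 1, 'MS21043': 1, 'MS21044': 1, 'MS21045': 1,
--     'NAS1021': 1, 'BACN10': 1, 'AN365': 1,
--     'AN315': 2, 'AN316': 2,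
--     'AN320': 3, 'MS20364': 3,
--     'MS21047': 4, 'MS21048': 4, 'MS21049': 4, 'NAS1473': 4,
--     'AN361': 5, 'MS51952': 5,
--     'MS21050': 6, 'NAS1778': 6,
--     'MS51866': 7,
--     'AN460': 8, 'MS51972': 8,
-- }
-- _NUT_NAMES = ['castle', 'locknut', 'wing', 'slotted', 'flange',
--               'square', 'jam', 'coupling', 'acorn']
--
--
-- def get_nut_type(part_number: str) -> str:
--     """Determine nut type from part number."""
--     pn_upper = part_number.upper()
--     best = len(_NUT_NAMES)
--     for pattern, rank in _PRIORITY.items():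
--         if pattern in pn_upper:
--             best = min(best, rank)
--     return _NUT_NAMES[best] if best < len(_NUT_NAMES) else 'hex'
-- ===== Notes on version B (the rewrite author's own statement) =====
-- stated objective: alternative
-- what changed: Replaces A's nine-branch early-return cascade of any() checks with an arithmetical formulation: a flat pattern->rank priority dict scanned once with a running min accumulator (no early return), indexing a name table by the minimal matched rank, with the same default fallthrough.
import Mathlib
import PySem

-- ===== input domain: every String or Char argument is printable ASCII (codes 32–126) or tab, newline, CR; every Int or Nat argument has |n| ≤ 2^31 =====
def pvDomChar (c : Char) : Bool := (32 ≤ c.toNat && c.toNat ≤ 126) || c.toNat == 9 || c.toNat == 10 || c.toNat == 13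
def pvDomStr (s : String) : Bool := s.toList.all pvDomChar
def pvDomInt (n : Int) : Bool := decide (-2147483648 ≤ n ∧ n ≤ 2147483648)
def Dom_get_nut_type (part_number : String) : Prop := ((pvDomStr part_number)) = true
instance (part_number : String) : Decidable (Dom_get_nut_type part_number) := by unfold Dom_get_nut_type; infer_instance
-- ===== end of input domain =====

-- ===== PORT A =====
-- B replaces A's early-return cascade with a flat pattern->rank scan taking a running min; same values.
def get_nut_type (part_number : String) : String :=
  let pn_upper := PySem.Str.upper part_number
  if ["AN310", "MS20365", "NAS1291"].any (fun x => PySem.Str.isIn x pn_upper) then "castle"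
  else if ["MS21042", "MS21043", "MS21044", "MS21045", "NAS1021", "BACN10", "AN365"].any (fun x => PySem.Str.isIn x pn_upper) then "locknut"
  else if PySem.Str.isIn "AN315" pn_upper || PySem.Str.isIn "AN316" pn_upper then "wing"
  else if ["AN320", "MS20364"].any (fun x => PySem.Str.isIn x pn_upper) then "slotted"
  else if ["MS21047", "MS21048", "MS21049", "NAS1473"].any (fun x => PySem.Str.isIn x pn_upper) then "flange"
  else if PySem.Str.isIn "AN361" pn_upper || PySem.Str.isIn "MS51952" pn_upper then "square"
  else if ["AN316", "MS21050", "NAS1778"].any (fun x => PySem.Str.isIn x pn_upper) then "jam"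
  else if PySem.Str.isIn "MS51866" pn_upper then "coupling"
  else if PySem.Str.isIn "AN460" pn_upper || PySem.Str.isIn "MS51972" pn_upper then "acorn"
  else "hex"

-- ===== PORT B =====
-- Source B's module-level _PRIORITY dict (insertion order) and _NUT_NAMES list, as literals.
def nutPriority : List (String × Nat) :=
  [ ("AN310", 0),
    ("MS20365", 0),
    ("NAS1291", 0),
    ("MS21042", 1),
    ("MS21043", 1),
    ("MS21044", 1),
    ("MS21045", 1),
    ("NAS1021", 1),
    ("BACN10", 1),
    ("AN365", 1),
    ("AN315", 2),
    ("AN316", 2),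
    ("AN320", 3),
    ("MS20364", 3),
    ("MS21047", 4),
    ("MS21048", 4),
    ("MS21049", 4),
    ("NAS1473", 4),
    ("AN361", 5),
    ("MS51952", 5),
    ("MS21050", 6),
    ("NAS1778", 6),
    ("MS51866", 7),
    ("AN460", 8),
    ("MS51972", 8) ]

def nutNames : List String :=
  ["castle", "locknut", "wing", "slotted", "flange", "square", "jam", "coupling", "acorn"]

def get_nut_type_alt (part_number : String) : String :=
  let pn_upper := PySem.Str.upper part_number
  let best := nutPriority.foldl
    (fun best pr => if PySem.Str.isIn pr.1 pn_upper then min best pr.2 else best)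
    nutNames.length
  -- _NUT_NAMES[best]: the guard best < len guarantees the index is in range, so getD is never the default
  if best < nutNames.length then (PySem.List.pyGet? nutNames (best : Int)).getD "hex" else "hex"

-- ===== PRECONDITION & SPEC =====
def Spec_get_nut_type (part_number : String) (out : String) : Prop := out = get_nut_type_alt part_number
instance (part_number : String) (out : String) : Decidable (Spec_get_nut_type part_number out) := by unfold Spec_get_nut_type; infer_instance

-- ===== CLAIM (what is proved, stated in full; the proofs are below) =====
def Claim_equal_get_nut_type : Prop := ∀ (part_number : String), Dom_get_nut_type part_number → Spec_get_nut_type part_number (get_nut_type part_number)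

-- ===== LEMMAS AND PROOFS =====

-- ===== VERDICT (by name: the statement is the Claim_ definition above) =====
theorem get_nut_type_spec : Claim_equal_get_nut_type := by
  intro pn _
  unfold Spec_get_nut_type get_nut_type get_nut_type_alt nutPriority nutNames
  by_cases h0 : PySem.Chars.isIn ['A', 'N', '3', '1', '0'] (PySem.Chars.upper pn.toList) = true
  · simp [h0]
  by_cases h1 : PySem.Chars.isIn ['M', 'S', '2', '0', '3', '6', '5'] (PySem.Chars.upper pn.toList) = true
  · simp [h0, h1]
  by_cases h2 : PySem.Chars.isIn ['N', 'A', 'S', '1', '2', '9', '1'] (PySem.Chars.upper pn.toList) = true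
  · simp [h0, h1, h2]
  by_cases h3 : PySem.Chars.isIn ['M', 'S', '2', '1', '0', '4', '2'] (PySem.Chars.upper pn.toList) = true
  · simp [h0, h1, h2, h3]
  by_cases h4 : PySem.Chars.isIn ['M', 'S', '2', '1', '0', '4', '3'] (PySem.Chars.upper pn.toList) = true
  · simp [h0, h1, h2, h3, h4]
  by_cases h5 : PySem.Chars.isIn ['M', 'S', '2', '1', '0', '4', '4'] (PySem.Chars.upper pn.toList) = true
  · simp [h0, h1, h2, h3, h4, h5]
  by_cases h6 : PySem.Chars.isIn ['M', 'S', '2', '1', '0', '4', '5'] (PySem.Chars.upper pn.toList) = true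
  · simp [h0, h1, h2, h3, h4, h5, h6]
  by_cases h7 : PySem.Chars.isIn ['N', 'A', 'S', '1', '0', '2', '1'] (PySem.Chars.upper pn.toList) = true
  · simp [h0, h1, h2, h3, h4, h5, h6, h7]
  by_cases h8 : PySem.Chars.isIn ['B', 'A', 'C', 'N', '1', '0'] (PySem.Chars.upper pn.toList) = true
  · simp [h0, h1, h2, h3, h4, h5, h6, h7, h8]
  by_cases h9 : PySem.Chars.isIn ['A', 'N', '3', '6', '5'] (PySem.Chars.upper pn.toList) = true
  · simp [h0, h1, h2, h3, h4, h5, h6, h7, h8, h9]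
  by_cases h10 : PySem.Chars.isIn ['A', 'N', '3', '1', '5'] (PySem.Chars.upper pn.toList) = true
  · simp [h0, h1, h2, h3, h4, h5, h6, h7, h8, h9, h10]
  by_cases h11 : PySem.Chars.isIn ['A', 'N', '3', '1', '6'] (PySem.Chars.upper pn.toList) = true
  · simp [h0, h1, h2, h3, h4, h5, h6, h7, h8, h9, h10, h11]
  by_cases h12 : PySem.Chars.isIn ['A', 'N', '3', '2', '0'] (PySem.Chars.upper pn.toList) = true
  · simp [h0, h1, h2, h3, h4, h5, h6, h7, h8, h9, h10, h11, h12]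
  by_cases h13 : PySem.Chars.isIn ['M', 'S', '2', '0', '3', '6', '4'] (PySem.Chars.upper pn.toList) = true
  · simp [h0, h1, h2, h3, h4, h5, h6, h7, h8, h9, h10, h11, h12, h13]
  by_cases h14 : PySem.Chars.isIn ['M', 'S', '2', '1', '0', '4', '7'] (PySem.Chars.upper pn.toList) = true
  · simp [h0, h1, h2, h3, h4, h5, h6, h7, h8, h9, h10, h11, h12, h13, h14]
  by_cases h15 : PySem.Chars.isIn ['M', 'S', '2', '1', '0', '4', '8'] (PySem.Chars.upper pn.toList) = true
  · simp [h0, h1, h2, h3, h4, h5, h6, h7, h8, h9, h10, h11, h12, h13, h14, h15]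
  by_cases h16 : PySem.Chars.isIn ['M', 'S', '2', '1', '0', '4', '9'] (PySem.Chars.upper pn.toList) = true
  · simp [h0, h1, h2, h3, h4, h5, h6, h7, h8, h9, h10, h11, h12, h13, h14, h15, h16]
  by_cases h17 : PySem.Chars.isIn ['N', 'A', 'S', '1', '4', '7', '3'] (PySem.Chars.upper pn.toList) = true
  · simp [h0, h1, h2, h3, h4, h5, h6, h7, h8, h9, h10, h11, h12, h13, h14, h15, h16, h17]
  by_cases h18 : PySem.Chars.isIn ['A', 'N', '3', '6', '1'] (PySem.Chars.upper pn.toList) = true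
  · simp [h0, h1, h2, h3, h4, h5, h6, h7, h8, h9, h10, h11, h12, h13, h14, h15, h16, h17, h18]
  by_cases h19 : PySem.Chars.isIn ['M', 'S', '5', '1', '9', '5', '2'] (PySem.Chars.upper pn.toList) = true
  · simp [h0, h1, h2, h3, h4, h5, h6, h7, h8, h9, h10, h11, h12, h13, h14, h15, h16, h17, h18, h19]
  by_cases h20 : PySem.Chars.isIn ['M', 'S', '2', '1', '0', '5', '0'] (PySem.Chars.upper pn.toList) = true
  · simp [h0, h1, h2, h3, h4, h5, h6, h7, h8, h9, h10, h11, h12, h13, h14, h15, h16, h17, h18, h19, h20]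
  by_cases h21 : PySem.Chars.isIn ['N', 'A', 'S', '1', '7', '7', '8'] (PySem.Chars.upper pn.toList) = true
  · simp [h0, h1, h2, h3, h4, h5, h6, h7, h8, h9, h10, h11, h12, h13, h14, h15, h16, h17, h18, h19, h20, h21]
  by_cases h22 : PySem.Chars.isIn ['M', 'S', '5', '1', '8', '6', '6'] (PySem.Chars.upper pn.toList) = true
  · simp [h0, h1, h2, h3, h4, h5, h6, h7, h8, h9, h10, h11, h12, h13, h14, h15, h16, h17, h18, h19, h20, h21, h22]
  by_cases h23 : PySem.Chars.isIn ['A', 'N', '4', '6', '0'] (PySem.Chars.upper pn.toList) = true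
  · simp [h0, h1, h2, h3, h4, h5, h6, h7, h8, h9, h10, h11, h12, h13, h14, h15, h16, h17, h18, h19, h20, h21, h22, h23]
  by_cases h24 : PySem.Chars.isIn ['M', 'S', '5', '1', '9', '7', '2'] (PySem.Chars.upper pn.toList) = true
  · simp [h0, h1, h2, h3, h4, h5, h6, h7, h8, h9, h10, h11, h12, h13, h14, h15, h16, h17, h18, h19, h20, h21, h22, h23, h24]
  simp [h0, h1, h2, h3, h4, h5, h6, h7, h8, h9, h10, h11, h12, h13, h14, h15, h16, h17, h18, h19, h20, h21, h22, h23, h24]
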